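-- pv_equiv track=rewrite | github.com/qsantos/advent-of-code | day22/main.py | backward_shuffle_polynomial
-- ===== SOURCE A (Python) =====
-- from typing import List, Tuple
--
-- Orders = List[str]
--
-- Linear = Tuple[int, int]
--
-- def euclidean(a: int, b: int) -> Tuple[int, int, int]:
--     if a == 0:
--         return (b, 0, 1)
--     else:
--         g, y, x = euclidean(b % a, a)
--         return (g, x - (b // a) * y, y)
--
-- def modinv(a: int, m: int) -> int:
--     g, x, y = euclidean(a, m)
--     if g != 1:
--         raise Exception('modular inverse does not exist')
--     else:
--         return x % m
--
-- def backward_shuffle_polynomial(orders: Orders, n_cards: int) -> Linear: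
--     a, b = 0, 1
--     for order in reversed(orders):
--         if order == 'deal into new stack':
--             a = - a - 1
--             b = - b
--         elif order.startswith('cut '):
--             N = int(order[4:])
--             a += N
--         elif order.startswith('deal with increment '):
--             N = int(order[20:])
--             invN = modinv(N, n_cards)
--             a = (a * invN) % n_cards
--             b = (b * invN) % n_cards
--         else:
--             assert False, order
--     return a % n_cards, b % n_cards
-- ===== SOURCE B (Python) =====
-- from typing import List, Tuple
--
-- Orders = List[str]
-- Linear = Tuple[int, int]
--
-- def backward_shuffle_polynomial(orders: Orders, n_cards: int) -> Linear:
--     # One forward pass building the forward shuffle polynomial F(x) = A*x + B,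
--     # then a single modular inversion at the end.
--     A, B = 1, 0
--     for order in orders:
--         if order == 'deal into new stack':
--             A, B = -A, -B - 1
--         elif order.startswith('cut '):
--             B -= int(order[4:])
--         elif order.startswith('deal with increment '):
--             N = int(order[20:])
--             A = A * N % n_cards
--             B = B * N % n_cards
--         else:
--             assert False, order
--     invA = pow(A, -1, n_cards)
--     return -invA * B % n_cards, invA % n_cards
-- ===== Notes on version B (the rewrite author's own statement) =====
-- stated objective: faster
-- what changed: B folds the operations forward into a single affine polynomial F(x)=A*x+B with no modular inverse inside the loop, then inverts F once with pow(A,-1,n_cards) at the end, instead of A's reversed-order fold that runs a recursive extended Euclid for every 'deal with increment' order.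
-- crash fix: On well-formed order lists whose increments are all coprime to n_cards but where some increment N is negative (or N=0 with n_cards=-1), A's recursive Euclid produces a gcd of the wrong sign and raises Exception('modular inverse does not exist') although the inverse exists; B returns the correct inverse polynomial there (e.g. (0, 3) for (['deal with increment -3'], 10)). — e.g. on backward_shuffle_polynomial(["deal with increment -3"], 10): A raises Exception, B returns (0, 3)
import Mathlib
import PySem

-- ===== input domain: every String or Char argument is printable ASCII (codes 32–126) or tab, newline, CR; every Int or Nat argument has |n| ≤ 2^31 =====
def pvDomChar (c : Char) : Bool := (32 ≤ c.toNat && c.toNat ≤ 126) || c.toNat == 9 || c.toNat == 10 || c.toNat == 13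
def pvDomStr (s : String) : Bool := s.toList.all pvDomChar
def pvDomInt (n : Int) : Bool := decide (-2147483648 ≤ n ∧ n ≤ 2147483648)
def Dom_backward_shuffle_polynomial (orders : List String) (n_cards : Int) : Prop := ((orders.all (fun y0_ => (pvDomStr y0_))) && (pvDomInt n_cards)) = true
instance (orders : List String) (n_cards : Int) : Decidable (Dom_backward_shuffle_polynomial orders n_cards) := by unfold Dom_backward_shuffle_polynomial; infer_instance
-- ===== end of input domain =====

-- B replaces A's reversed-order fold (one recursive extended Euclid per 'deal with increment'
-- order) by a single forward pass building the forward polynomial F(x) = A*x + B and ONE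
-- modular inversion at the end (one Euclid total instead of one per increment order).

-- ===== PORT A =====
-- termination helper for the recursive Euclid (the port cites it in decreasing_by)
theorem pvFmodNatAbsLt (b : Int) {a : Int} (h : a ≠ 0) : (Int.fmod b a).natAbs < a.natAbs := by
  have h1 : 0 ≤ b % a := Int.emod_nonneg b h
  have h2 : b % a < (a.natAbs : Int) := by
    rcases lt_or_gt_of_ne h with hneg | hpos
    · have : b % a = b % (-a) := (Int.emod_neg b a).symm
      rw [this]; have := Int.emod_lt_of_pos b (b := -a) (by omega); omega
    · have := Int.emod_lt_of_pos b hpos; omega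
  rw [Int.fmod_eq_emod]
  split_ifs <;> omega

-- euclidean(a, b): Python's recursive extended Euclid (Python % and // are Int.fmod / Int.fdiv = PySem.Int.mod / floordiv)
def pyEuclidean (a b : Int) : Int × Int × Int :=
  if _h : a = 0 then (b, 0, 1)
  else
    match pyEuclidean (PySem.Int.mod b a) a with
    | (g, y, x) => (g, x - (PySem.Int.floordiv b a) * y, y)
termination_by a.natAbs
decreasing_by
  exact pvFmodNatAbsLt b _h

-- modinv(a, m): Python raises Exception when g ≠ 1 (such inputs are outside Pre_); the port returns 0 there
def pyModinv (a m : Int) : Int :=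
  let e := pyEuclidean a m
  if e.1 = 1 then PySem.Int.mod e.2.1 m else 0

-- one iteration of A's backward loop body, in A's branch order
def pvStepA (n : Int) (s : Int × Int) (order : String) : Int × Int :=
  if order = "deal into new stack" then (-s.1 - 1, -s.2)
  else if PySem.Str.startswith order "cut " then
    match PySem.Int.ofStr? (PySem.Str.slice order (some 4) none) with
    | some N => (s.1 + N, s.2)
    | none => s
  else if PySem.Str.startswith order "deal with increment " then
    match PySem.Int.ofStr? (PySem.Str.slice order (some 20) none) with
    | some N =>
        let invN := pyModinv N n
        (PySem.Int.mod (s.1 * invN) n, PySem.Int.mod (s.2 * invN) n)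
    | none => s
  else s

def backward_shuffle_polynomial (orders : List String) (n_cards : Int) : Int × Int :=
  let s := orders.reverse.foldl (pvStepA n_cards) (0, 1)
  (PySem.Int.mod s.1 n_cards, PySem.Int.mod s.2 n_cards)

-- ===== PORT B =====
-- port of the built-in pow(a, -1, m): exact where Python's pow returns, i.e. Int.gcd a m = 1
-- (there both are THE canonical inverse residue reduced by Python's %); Python raises ValueError elsewhere (outside Pre_)
def pyInvMod (a m : Int) : Int := PySem.Int.mod (Int.gcdA a m) m

-- one iteration of B's forward loop body
def pvStepB (n : Int) (s : Int × Int) (order : String) : Int × Int :=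
  if order = "deal into new stack" then (-s.1, -s.2 - 1)
  else if PySem.Str.startswith order "cut " then
    match PySem.Int.ofStr? (PySem.Str.slice order (some 4) none) with
    | some N => (s.1, s.2 - N)
    | none => s
  else if PySem.Str.startswith order "deal with increment " then
    match PySem.Int.ofStr? (PySem.Str.slice order (some 20) none) with
    | some N => (PySem.Int.mod (s.1 * N) n, PySem.Int.mod (s.2 * N) n)
    | none => s
  else s

def backward_shuffle_polynomial_alt (orders : List String) (n_cards : Int) : Int × Int :=
  let s := orders.foldl (pvStepB n_cards) (1, 0)
  let invA := pyInvMod s.1 n_cards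
  (PySem.Int.mod (-invA * s.2) n_cards, PySem.Int.mod invA n_cards)

-- ===== PRECONDITION & SPEC =====
-- Pre_ is EXACTLY the set of inputs on which Python A returns: n_cards ≠ 0, every order one of the
-- three recognised forms with a parseable integer, and every 'deal with increment N' has N > 0 and
-- gcd(N, n_cards) = 1 (or N = 0 with n_cards = 1): A's Euclid yields g = 1 precisely there
-- (for negative N its g comes out negative and modinv raises).
def pvOrderOK (n : Int) (o : String) : Bool :=
  (o == "deal into new stack") ||
  (PySem.Str.startswith o "cut " && (PySem.Int.ofStr? (PySem.Str.slice o (some 4) none)).isSome) ||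
  (PySem.Str.startswith o "deal with increment " &&
    match PySem.Int.ofStr? (PySem.Str.slice o (some 20) none) with
    | some N => (decide (0 < N) && decide (Int.gcd N n = 1)) || (decide (N = 0) && decide (n = 1))
    | none => false)

def Pre_backward_shuffle_polynomial (orders : List String) (n_cards : Int) : Prop :=
  n_cards ≠ 0 ∧ orders.all (pvOrderOK n_cards) = true
instance (orders : List String) (n_cards : Int) : Decidable (Pre_backward_shuffle_polynomial orders n_cards) := by
  unfold Pre_backward_shuffle_polynomial; infer_instance

def pvWitness_backward_shuffle_polynomial : List String × Int :=
  (["deal with increment 3", "cut -4", "deal into new stack"], 10)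

-- On well-formed order lists whose increments are all coprime to n_cards but where some increment N
-- is negative (or N = 0 with n_cards = -1), A raises Exception('modular inverse does not exist')
-- although the inverse exists; B returns the correct inverse polynomial there.
def pvOrderGcdOK (n : Int) (o : String) : Bool :=
  (o == "deal into new stack") ||
  (PySem.Str.startswith o "cut " && (PySem.Int.ofStr? (PySem.Str.slice o (some 4) none)).isSome) ||
  (PySem.Str.startswith o "deal with increment " &&
    match PySem.Int.ofStr? (PySem.Str.slice o (some 20) none) with
    | some N => decide (Int.gcd N n = 1)
    | none => false)

def pvNegInc (n : Int) (o : String) : Bool :=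
  PySem.Str.startswith o "deal with increment " &&
  match PySem.Int.ofStr? (PySem.Str.slice o (some 20) none) with
  | some N => decide (N < 0) || (decide (N = 0) && decide (n = -1))
  | none => false

def Raises_backward_shuffle_polynomial (orders : List String) (n_cards : Int) : Prop :=
  n_cards ≠ 0 ∧ orders.all (pvOrderGcdOK n_cards) = true ∧ orders.any (pvNegInc n_cards) = true
instance (orders : List String) (n_cards : Int) : Decidable (Raises_backward_shuffle_polynomial orders n_cards) := by
  unfold Raises_backward_shuffle_polynomial; infer_instance

def pvRaiseWitness_backward_shuffle_polynomial : List String × Int := (["deal with increment -3"], 10)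
def pvRaiseWitnessOut_backward_shuffle_polynomial : Int × Int := (0, 3)

def Spec_backward_shuffle_polynomial (orders : List String) (n_cards : Int) (out : Int × Int) : Prop :=
  out = backward_shuffle_polynomial_alt orders n_cards
instance (orders : List String) (n_cards : Int) (out : Int × Int) : Decidable (Spec_backward_shuffle_polynomial orders n_cards out) := by
  unfold Spec_backward_shuffle_polynomial; infer_instance

-- ===== CLAIM (what is proved, stated in full; the proofs are below) =====
def Claim_equal_backward_shuffle_polynomial : Prop := ∀ (orders : List String) (n_cards : Int), Dom_backward_shuffle_polynomial orders n_cards → Pre_backward_shuffle_polynomial orders n_cards → Spec_backward_shuffle_polynomial orders n_cards (backward_shuffle_polynomial orders n_cards)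

def Claim_raises_backward_shuffle_polynomial : Prop := (∀ (orders : List String) (n_cards : Int), Dom_backward_shuffle_polynomial orders n_cards → Raises_backward_shuffle_polynomial orders n_cards → ¬ Pre_backward_shuffle_polynomial orders n_cards) ∧ (Dom_backward_shuffle_polynomial (pvRaiseWitness_backward_shuffle_polynomial.1) (pvRaiseWitness_backward_shuffle_polynomial.2) ∧ Raises_backward_shuffle_polynomial (pvRaiseWitness_backward_shuffle_polynomial.1) (pvRaiseWitness_backward_shuffle_polynomial.2) ∧ backward_shuffle_polynomial_alt (pvRaiseWitness_backward_shuffle_polynomial.1) (pvRaiseWitness_backward_shuffle_polynomial.2) = pvRaiseWitnessOut_backward_shuffle_polynomial)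

-- ===== LEMMAS AND PROOFS =====

theorem pvFmodModEq (x n : Int) : Int.fmod x n ≡ x [ZMOD n] := by
  rw [Int.modEq_iff_dvd]
  have h := Int.fmod_add_mul_fdiv x n
  exact ⟨x.fdiv n, by linarith⟩

theorem pvFmodCongr {x y n : Int} (h : x ≡ y [ZMOD n]) : Int.fmod x n = Int.fmod y n := by
  have hx := h
  unfold Int.ModEq at hx
  rw [Int.fmod_eq_emod, Int.fmod_eq_emod, hx]
  have hd : (n ∣ x) ↔ (n ∣ y) := by
    rw [Int.dvd_iff_emod_eq_zero, Int.dvd_iff_emod_eq_zero, hx]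
  simp only [hd]

theorem pvGcdCongr {x y a : Int} (h : x ≡ y [ZMOD a]) : Int.gcd x a = Int.gcd y a := by
  obtain ⟨k, hk⟩ := Int.modEq_iff_dvd.mp h
  have : y = x + a * k := by linarith
  rw [this, Int.gcd_add_mul_left_left]

theorem pvModEqOfEq {x y n : Int} (h : x = y) : x ≡ y [ZMOD n] := by rw [h]

theorem pvEuclidBezout : ∀ (k : Nat) (a b : Int), a.natAbs ≤ k →
    a * (pyEuclidean a b).2.1 + b * (pyEuclidean a b).2.2 = (pyEuclidean a b).1 := by
  intro k
  induction k with
  | zero =>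
    intro a b hk
    have ha : a = 0 := by omega
    subst ha; rw [pyEuclidean]; simp
  | succ m ih =>
    intro a b hk
    by_cases h : a = 0
    · subst h; rw [pyEuclidean]; simp
    · rw [pyEuclidean]
      simp only [h, dite_false]
      have hlt : (PySem.Int.mod b a).natAbs < a.natAbs := pvFmodNatAbsLt b h
      have IH := ih (PySem.Int.mod b a) a (by omega)
      have hf : PySem.Int.mod b a + a * PySem.Int.floordiv b a = b :=
        Int.fmod_add_mul_fdiv b a
      rcases he : pyEuclidean (PySem.Int.mod b a) a with ⟨g, y, x⟩
      rw [he] at IH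
      simp only at IH ⊢
      linear_combination IH - y * hf

theorem pvEuclidGcd : ∀ (k : Nat) (a b : Int), a.natAbs ≤ k → 0 ≤ a → 0 ≤ b →
    (pyEuclidean a b).1 = (Int.gcd a b : Int) := by
  intro k
  induction k with
  | zero =>
    intro a b hk ha hb
    have : a = 0 := by omega
    subst this
    rw [pyEuclidean]
    simp [Int.natAbs_of_nonneg hb]
  | succ m ih =>
    intro a b hk ha hb
    by_cases h : a = 0
    · subst h; rw [pyEuclidean]; simp [Int.natAbs_of_nonneg hb]
    · rw [pyEuclidean]
      simp only [h, dite_false]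
      have hlt : (PySem.Int.mod b a).natAbs < a.natAbs := pvFmodNatAbsLt b h
      have hnn : 0 ≤ PySem.Int.mod b a := by
        simp only [PySem.Int.mod]
        rw [Int.fmod_eq_emod]
        have := Int.emod_nonneg b h
        split_ifs with hc
        · omega
        · exact absurd (Or.inl ha) hc
      have IH := ih (PySem.Int.mod b a) a (by omega) hnn ha
      rcases he : pyEuclidean (PySem.Int.mod b a) a with ⟨g, y, x⟩
      rw [he] at IH
      simp only at IH ⊢
      rw [IH]
      have hcong : Int.gcd (PySem.Int.mod b a) a = Int.gcd b a := pvGcdCongr (pvFmodModEq b a)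
      rw [hcong, Int.gcd_comm]

theorem pvIncEuclid {N n : Int} (h : (0 < N ∧ Int.gcd N n = 1) ∨ (N = 0 ∧ n = 1)) :
    (pyEuclidean N n).1 = 1 := by
  rcases h with ⟨hN, hg⟩ | ⟨hN, hn⟩
  · rw [pyEuclidean]
    have hne : N ≠ 0 := by omega
    simp only [hne, dite_false]
    have hnn : 0 ≤ PySem.Int.mod n N := by
      simp only [PySem.Int.mod]
      rw [Int.fmod_eq_emod]
      have := Int.emod_nonneg n hne
      split_ifs with hc
      · omega
      · exact absurd (Or.inl (by omega)) hc
    have hg2 := pvEuclidGcd (PySem.Int.mod n N).natAbs (PySem.Int.mod n N) N le_rfl hnn (by omega)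
    have hcong : Int.gcd (PySem.Int.mod n N) N = Int.gcd n N := pvGcdCongr (pvFmodModEq n N)
    rcases he : pyEuclidean (PySem.Int.mod n N) N with ⟨g, y, x⟩
    rw [he] at hg2
    simp only at hg2 ⊢
    rw [hg2, hcong, Int.gcd_comm, hg]
    rfl
  · subst hN; subst hn; rw [pyEuclidean]; simp

theorem pvModinvOK {N n : Int} (h : (pyEuclidean N n).1 = 1) :
    N * pyModinv N n ≡ 1 [ZMOD n] := by
  unfold pyModinv
  simp only [h, if_true]
  have bez := pvEuclidBezout N.natAbs N n le_rfl
  rw [h] at bez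
  have step1 : N * PySem.Int.mod (pyEuclidean N n).2.1 n ≡ N * (pyEuclidean N n).2.1 [ZMOD n] :=
    Int.ModEq.mul_left N (pvFmodModEq (pyEuclidean N n).2.1 n)
  refine step1.trans ?_
  rw [Int.modEq_iff_dvd]
  exact ⟨(pyEuclidean N n).2.2, by linarith⟩

theorem pvInvModOK {A n : Int} (h : Int.gcd A n = 1) :
    A * pyInvMod A n ≡ 1 [ZMOD n] := by
  unfold pyInvMod
  have bez := Int.gcd_eq_gcd_ab A n
  rw [h] at bez
  have step1 : A * PySem.Int.mod (Int.gcdA A n) n ≡ A * Int.gcdA A n [ZMOD n] :=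
    Int.ModEq.mul_left A (pvFmodModEq (Int.gcdA A n) n)
  refine step1.trans ?_
  rw [Int.modEq_iff_dvd]
  exact ⟨Int.gcdB A n, by push_cast at bez; linarith⟩

theorem pvNotCut (o : String) (h : PySem.Str.startswith o "deal with increment " = true) :
    PySem.Str.startswith o "cut " = false := by
  rw [PySem.Str.startswith_eq] at *
  unfold PySem.Chars.startswith at *
  cases hl : o.toList with
  | nil => rw [hl] at h; simp at h
  | cons c t =>
    rw [hl] at h
    have hc : c = 'd' := by
      have h2 : ('d' :: "eal with increment ".toList).isPrefixOf (c :: t) = true := h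
      simp [List.isPrefixOf] at h2; exact h2.1.symm
    subst hc
    show ('c' :: "ut ".toList).isPrefixOf ('d' :: t) = false
    simp [List.isPrefixOf]

theorem pvIncNotStack (o : String) (h : PySem.Str.startswith o "deal with increment " = true) :
    o ≠ "deal into new stack" := by
  intro he; subst he; exact absurd h (by decide)

theorem pvCutNotStack (o : String) (h : PySem.Str.startswith o "cut " = true) :
    o ≠ "deal into new stack" := by
  intro he; subst he; exact absurd h (by decide)

theorem pvStepB_affine (n : Int) (o : String) (s : Int × Int) :
    (pvStepB n s o).1 ≡ (pvStepB n (1,0) o).1 * s.1 [ZMOD n] ∧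
    (pvStepB n s o).2 ≡ (pvStepB n (1,0) o).1 * s.2 + (pvStepB n (1,0) o).2 [ZMOD n] := by
  unfold pvStepB
  split_ifs with h1 h2 h3
  · exact ⟨pvModEqOfEq (by ring), pvModEqOfEq (by ring)⟩
  · rcases hM : PySem.Int.ofStr? (PySem.Str.slice o (some 4) none) with _ | N
    ·
      exact ⟨pvModEqOfEq (by ring), pvModEqOfEq (by ring)⟩
    ·
      exact ⟨pvModEqOfEq (by ring), pvModEqOfEq (by ring)⟩
  · rcases hM : PySem.Int.ofStr? (PySem.Str.slice o (some 20) none) with _ | N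
    ·
      exact ⟨pvModEqOfEq (by ring), pvModEqOfEq (by ring)⟩
    ·
      constructor
      · calc PySem.Int.mod (s.1 * N) n ≡ s.1 * N [ZMOD n] := pvFmodModEq _ n
          _ = (1 * N) * s.1 := by ring
          _ ≡ PySem.Int.mod (1 * N) n * s.1 [ZMOD n] := ((pvFmodModEq (1*N) n).symm).mul_right s.1
      · calc PySem.Int.mod (s.2 * N) n ≡ s.2 * N [ZMOD n] := pvFmodModEq _ n
          _ = (1 * N) * s.2 + 0 := by ring
          _ ≡ PySem.Int.mod (1 * N) n * s.2 + PySem.Int.mod (0 * N) n [ZMOD n] := by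
              have e0 : PySem.Int.mod (0 * N) n = 0 := by
                simp only [PySem.Int.mod, zero_mul, Int.zero_fmod]
              rw [e0]
              exact ((pvFmodModEq (1*N) n).symm).mul_right s.2 |>.add_right 0
  · exact ⟨pvModEqOfEq (by ring), pvModEqOfEq (by ring)⟩

theorem pvFoldB (n : Int) : ∀ (l : List String) (s : Int × Int),
    (l.foldl (pvStepB n) s).1 ≡ (l.foldl (pvStepB n) (1,0)).1 * s.1 [ZMOD n] ∧
    (l.foldl (pvStepB n) s).2 ≡ (l.foldl (pvStepB n) (1,0)).1 * s.2 + (l.foldl (pvStepB n) (1,0)).2 [ZMOD n] := by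
  intro l
  induction l with
  | nil =>
    intro s
    simp only [List.foldl_nil]
    exact ⟨pvModEqOfEq (by ring), pvModEqOfEq (by ring)⟩
  | cons o t ih =>
    intro s
    simp only [List.foldl_cons]
    obtain ⟨hs1, hs2⟩ := pvStepB_affine n o s
    obtain ⟨is1, is2⟩ := ih (pvStepB n s o)
    obtain ⟨i11, i12⟩ := ih (pvStepB n (1,0) o)
    constructor
    · calc (t.foldl (pvStepB n) (pvStepB n s o)).1
          ≡ (t.foldl (pvStepB n) (1,0)).1 * (pvStepB n s o).1 [ZMOD n] := is1
        _ ≡ (t.foldl (pvStepB n) (1,0)).1 * ((pvStepB n (1,0) o).1 * s.1) [ZMOD n] :=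
            hs1.mul_left _
        _ = ((t.foldl (pvStepB n) (1,0)).1 * (pvStepB n (1,0) o).1) * s.1 := by ring
        _ ≡ (t.foldl (pvStepB n) (pvStepB n (1,0) o)).1 * s.1 [ZMOD n] := i11.symm.mul_right s.1
    · calc (t.foldl (pvStepB n) (pvStepB n s o)).2
          ≡ (t.foldl (pvStepB n) (1,0)).1 * (pvStepB n s o).2 + (t.foldl (pvStepB n) (1,0)).2 [ZMOD n] := is2
        _ ≡ (t.foldl (pvStepB n) (1,0)).1 * ((pvStepB n (1,0) o).1 * s.2 + (pvStepB n (1,0) o).2) + (t.foldl (pvStepB n) (1,0)).2 [ZMOD n] :=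
            (hs2.mul_left _).add_right _
        _ = (t.foldl (pvStepB n) (1,0)).1 * (pvStepB n (1,0) o).1 * s.2 + ((t.foldl (pvStepB n) (1,0)).1 * (pvStepB n (1,0) o).2 + (t.foldl (pvStepB n) (1,0)).2) := by ring
        _ ≡ (t.foldl (pvStepB n) (pvStepB n (1,0) o)).1 * s.2 + (t.foldl (pvStepB n) (pvStepB n (1,0) o)).2 [ZMOD n] :=
            Int.ModEq.add (i11.symm.mul_right s.2) i12.symm

theorem pvInvariant (n : Int) : ∀ l : List String, l.all (pvOrderOK n) = true →
    ((l.foldr (fun o s => pvStepA n s o) (0,1)).2 * (l.foldl (pvStepB n) (1,0)).1 ≡ 1 [ZMOD n]) ∧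
    ((l.foldr (fun o s => pvStepA n s o) (0,1)).1 ≡
       -((l.foldr (fun o s => pvStepA n s o) (0,1)).2 * (l.foldl (pvStepB n) (1,0)).2) [ZMOD n]) := by
  intro l
  induction l with
  | nil =>
    intro _
    exact ⟨pvModEqOfEq (by norm_num), pvModEqOfEq (by norm_num)⟩
  | cons o t ih =>
    intro hall
    rw [List.all_cons, Bool.and_eq_true] at hall
    obtain ⟨hok, htall⟩ := hall
    obtain ⟨I1, I2⟩ := ih htall
    simp only [List.foldr_cons, List.foldl_cons]
    set bk := t.foldr (fun o s => pvStepA n s o) (0,1) with hbk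
    set fw := t.foldl (pvStepB n) (1,0) with hfw
    unfold pvOrderOK at hok
    simp only [Bool.or_eq_true] at hok
    rcases hok with (hstk | hcut) | hinc
    · -- deal into new stack
      have ho : o = "deal into new stack" := beq_iff_eq.mp hstk
      have hsA : pvStepA n bk o = (-bk.1 - 1, -bk.2) := by
        unfold pvStepA; rw [if_pos ho]
      have hsB : pvStepB n (1,0) o = (-1, -0-1) := by
        unfold pvStepB; rw [if_pos ho]
      have F := pvFoldB n t (pvStepB n (1,0) o)
      rw [hsB] at F
      obtain ⟨F1, F2⟩ := F
      rw [hsA, hsB]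
      constructor
      · calc (-bk.1 - 1, -bk.2).2 * (t.foldl (pvStepB n) (-1, -0-1)).1
            = -(bk.2 * (t.foldl (pvStepB n) (-1, -0-1)).1) := by ring
          _ ≡ -(bk.2 * (fw.1 * (-1 : Int))) [ZMOD n] := (F1.mul_left bk.2).neg
          _ = bk.2 * fw.1 := by ring
          _ ≡ 1 [ZMOD n] := I1
      · calc (-bk.1 - 1, -bk.2).1 = -bk.1 - 1 := rfl
          _ ≡ -(-(bk.2 * fw.2)) - 1 [ZMOD n] := (I2.neg).sub_right 1
          _ = bk.2 * fw.2 - 1 := by ring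
          _ ≡ bk.2 * fw.2 - bk.2 * fw.1 [ZMOD n] := Int.ModEq.sub (Int.ModEq.refl _) I1.symm
          _ = -(-bk.2 * (fw.1 * (-0-1) + fw.2)) := by ring
          _ ≡ -(-bk.2 * (t.foldl (pvStepB n) (-1, -0-1)).2) [ZMOD n] := (F2.symm.mul_left (-bk.2)).neg
          _ = -((-bk.1 - 1, -bk.2).2 * (t.foldl (pvStepB n) (-1, -0-1)).2) := by ring
    · -- cut N
      rw [Bool.and_eq_true] at hcut
      obtain ⟨hsw, hparse⟩ := hcut
      rcases hN : PySem.Int.ofStr? (PySem.Str.slice o (some 4) none) with _ | N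
      · rw [hN] at hparse; simp at hparse
      have hne := pvCutNotStack o hsw
      have hsA : pvStepA n bk o = (bk.1 + N, bk.2) := by
        unfold pvStepA; rw [if_neg hne, if_pos hsw, hN]
      have hsB : pvStepB n (1,0) o = (1, 0 - N) := by
        unfold pvStepB; rw [if_neg hne, if_pos hsw, hN]
      have F := pvFoldB n t (pvStepB n (1,0) o)
      rw [hsB] at F
      obtain ⟨F1, F2⟩ := F
      rw [hsA, hsB]
      constructor
      · calc (bk.1 + N, bk.2).2 * (t.foldl (pvStepB n) (1, 0 - N)).1
            = bk.2 * (t.foldl (pvStepB n) (1, 0 - N)).1 := rfl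
          _ ≡ bk.2 * (fw.1 * 1) [ZMOD n] := F1.mul_left bk.2
          _ = bk.2 * fw.1 := by ring
          _ ≡ 1 [ZMOD n] := I1
      · calc (bk.1 + N, bk.2).1 = bk.1 + N := rfl
          _ ≡ -(bk.2 * fw.2) + N [ZMOD n] := I2.add_right N
          _ ≡ -(bk.2 * fw.2) + (bk.2 * fw.1) * N [ZMOD n] := by
              have : (1 : Int) * N ≡ (bk.2 * fw.1) * N [ZMOD n] := I1.symm.mul_right N
              simpa using this.add_left (-(bk.2 * fw.2))
          _ = -(bk.2 * (fw.1 * (0 - N) + fw.2)) := by ring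
          _ ≡ -(bk.2 * (t.foldl (pvStepB n) (1, 0 - N)).2) [ZMOD n] := (F2.symm.mul_left bk.2).neg
          _ = -((bk.1 + N, bk.2).2 * (t.foldl (pvStepB n) (1, 0 - N)).2) := rfl
    · -- deal with increment N
      rw [Bool.and_eq_true] at hinc
      obtain ⟨hsw, hcond⟩ := hinc
      have hne := pvIncNotStack o hsw
      have hnc := pvNotCut o hsw
      rcases hN : PySem.Int.ofStr? (PySem.Str.slice o (some 20) none) with _ | N
      · rw [hN] at hcond; simp at hcond
      rw [hN] at hcond
      have hgood : (0 < N ∧ Int.gcd N n = 1) ∨ (N = 0 ∧ n = 1) := by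
        simp only [Bool.or_eq_true, Bool.and_eq_true, decide_eq_true_eq] at hcond
        exact hcond
      have hg1 : (pyEuclidean N n).1 = 1 := pvIncEuclid hgood
      have hinv : N * pyModinv N n ≡ 1 [ZMOD n] := pvModinvOK hg1
      have hsA : pvStepA n bk o =
          (PySem.Int.mod (bk.1 * pyModinv N n) n, PySem.Int.mod (bk.2 * pyModinv N n) n) := by
        unfold pvStepA; rw [if_neg hne, if_neg (by rw [hnc]; simp), if_pos hsw, hN]
      have hsB : pvStepB n (1,0) o = (PySem.Int.mod (1 * N) n, PySem.Int.mod (0 * N) n) := by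
        unfold pvStepB; rw [if_neg hne, if_neg (by rw [hnc]; simp), if_pos hsw, hN]
      have F := pvFoldB n t (pvStepB n (1,0) o)
      rw [hsB] at F
      obtain ⟨F1, F2⟩ := F
      rw [hsA, hsB]
      have hα : PySem.Int.mod (1 * N) n ≡ N [ZMOD n] := by
        simpa using pvFmodModEq (1 * N) n
      have hβ : PySem.Int.mod (0 * N) n = 0 := by
        simp only [PySem.Int.mod, zero_mul, Int.zero_fmod]
      constructor
      · calc (PySem.Int.mod (bk.1 * pyModinv N n) n, PySem.Int.mod (bk.2 * pyModinv N n) n).2 *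
              (t.foldl (pvStepB n) (PySem.Int.mod (1 * N) n, PySem.Int.mod (0 * N) n)).1
            ≡ (bk.2 * pyModinv N n) * (fw.1 * PySem.Int.mod (1 * N) n) [ZMOD n] :=
              Int.ModEq.mul (pvFmodModEq _ n) F1
          _ ≡ (bk.2 * pyModinv N n) * (fw.1 * N) [ZMOD n] := (hα.mul_left fw.1).mul_left _
          _ = (bk.2 * fw.1) * (N * pyModinv N n) := by ring
          _ ≡ 1 * 1 [ZMOD n] := Int.ModEq.mul I1 hinv
          _ = 1 := by ring
      · calc (PySem.Int.mod (bk.1 * pyModinv N n) n, PySem.Int.mod (bk.2 * pyModinv N n) n).1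
            ≡ bk.1 * pyModinv N n [ZMOD n] := pvFmodModEq _ n
          _ ≡ -(bk.2 * fw.2) * pyModinv N n [ZMOD n] := I2.mul_right _
          _ = -((bk.2 * pyModinv N n) * fw.2) := by ring
          _ = -((bk.2 * pyModinv N n) * (fw.1 * PySem.Int.mod (0 * N) n + fw.2)) := by
              rw [hβ]; ring
          _ ≡ -(PySem.Int.mod (bk.2 * pyModinv N n) n *
                (t.foldl (pvStepB n) (PySem.Int.mod (1 * N) n, PySem.Int.mod (0 * N) n)).2) [ZMOD n] :=
              (Int.ModEq.mul (pvFmodModEq _ n).symm F2.symm).neg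


theorem pv_raises_excl : ∀ (orders : List String) (n_cards : Int),
    Dom_backward_shuffle_polynomial orders n_cards →
    Raises_backward_shuffle_polynomial orders n_cards →
    ¬ Pre_backward_shuffle_polynomial orders n_cards := by
  intro orders n _hdom hR hpre
  obtain ⟨-, -, hany⟩ := hR
  obtain ⟨-, hall⟩ := hpre
  obtain ⟨o, ho, hneg⟩ := List.any_eq_true.mp hany
  have hok : pvOrderOK n o = true := List.all_eq_true.mp hall o ho
  unfold pvNegInc at hneg
  rw [Bool.and_eq_true] at hneg
  obtain ⟨hsw, hcond⟩ := hneg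
  rcases hN : PySem.Int.ofStr? (PySem.Str.slice o (some 20) none) with _ | N
  · rw [hN] at hcond; simp at hcond
  rw [hN] at hcond
  simp only [Bool.or_eq_true, Bool.and_eq_true, decide_eq_true_eq] at hcond
  unfold pvOrderOK at hok
  simp only [Bool.or_eq_true, Bool.and_eq_true] at hok
  rcases hok with (hstk | hcut) | hinc
  · exact pvIncNotStack o hsw (beq_iff_eq.mp hstk)
  · rw [pvNotCut o hsw] at hcut
    exact absurd hcut.1 (by simp)
  · obtain ⟨-, hcond2⟩ := hinc
    rw [hN] at hcond2
    simp only [Bool.or_eq_true, Bool.and_eq_true, decide_eq_true_eq] at hcond2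
    rcases hcond with h | ⟨h0, hm1⟩ <;> rcases hcond2 with ⟨h1, h2⟩ | ⟨h1, h2⟩ <;> omega

-- ===== VERDICT =====
theorem backward_shuffle_polynomial_spec : Claim_equal_backward_shuffle_polynomial := by
  intro orders n _hdom hpre
  obtain ⟨hn, hall⟩ := hpre
  unfold Spec_backward_shuffle_polynomial
  unfold backward_shuffle_polynomial backward_shuffle_polynomial_alt
  simp only [List.foldl_reverse]
  obtain ⟨I1, I2⟩ := pvInvariant n orders hall
  set bk := orders.foldr (fun o s => pvStepA n s o) (0,1) with hbk
  set fw := orders.foldl (pvStepB n) (1,0) with hfw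
  have hgcd : Int.gcd fw.1 n = 1 := by
    obtain ⟨k, hk⟩ := Int.modEq_iff_dvd.mp I1
    exact Int.isCoprime_iff_gcd_eq_one.mp ⟨bk.2, k, by linarith⟩
  have hinv : fw.1 * pyInvMod fw.1 n ≡ 1 [ZMOD n] := pvInvModOK hgcd
  have hb : bk.2 ≡ pyInvMod fw.1 n [ZMOD n] := by
    calc bk.2 = bk.2 * 1 := by ring
      _ ≡ bk.2 * (fw.1 * pyInvMod fw.1 n) [ZMOD n] := hinv.symm.mul_left bk.2
      _ = (bk.2 * fw.1) * pyInvMod fw.1 n := by ring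
      _ ≡ 1 * pyInvMod fw.1 n [ZMOD n] := I1.mul_right _
      _ = pyInvMod fw.1 n := by ring
  have ha : bk.1 ≡ -pyInvMod fw.1 n * fw.2 [ZMOD n] := by
    calc bk.1 ≡ -(bk.2 * fw.2) [ZMOD n] := I2
      _ ≡ -(pyInvMod fw.1 n * fw.2) [ZMOD n] := (hb.mul_right fw.2).neg
      _ = -pyInvMod fw.1 n * fw.2 := by ring
  have h1 : PySem.Int.mod bk.1 n = PySem.Int.mod (-pyInvMod fw.1 n * fw.2) n := pvFmodCongr ha
  have h2 : PySem.Int.mod bk.2 n = PySem.Int.mod (pyInvMod fw.1 n) n := pvFmodCongr hb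
  rw [h1, h2]

@[simp] theorem backward_shuffle_polynomial_raises : Claim_raises_backward_shuffle_polynomial := by
  unfold Claim_raises_backward_shuffle_polynomial
  exact ⟨pv_raises_excl, by decide⟩
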